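-- pv_equiv track=rewrite | github.com/Pratimahande/Pratima_FBS | Core Python/Assignment/Assignment_11/Q3.py | sort_by_sec_ele
-- ===== SOURCE A (Python) =====
-- def sort_by_sec_ele(li):
--     size = len(li)
--     for i in range(1,size):
--         for j in range(0,size - 1 ):
--
--             if(li[j][1] > li[j + 1][1]):
--                 temp=li[j]
--                 li[j]=li[j+1]
--                 li[j+1]=temp
--     return li
-- ===== SOURCE B (Python) =====
-- def sort_by_sec_ele(li):
--     li.sort(key=lambda t: t[1])
--     return li
-- ===== Notes on version B (the rewrite author's own statement) =====
-- stated objective: faster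
-- what changed: Replaces the hand-written quadratic bubble sort with Python's built-in stable sort (li.sort with key = second component), mutating the same list in place.
import Mathlib
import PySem

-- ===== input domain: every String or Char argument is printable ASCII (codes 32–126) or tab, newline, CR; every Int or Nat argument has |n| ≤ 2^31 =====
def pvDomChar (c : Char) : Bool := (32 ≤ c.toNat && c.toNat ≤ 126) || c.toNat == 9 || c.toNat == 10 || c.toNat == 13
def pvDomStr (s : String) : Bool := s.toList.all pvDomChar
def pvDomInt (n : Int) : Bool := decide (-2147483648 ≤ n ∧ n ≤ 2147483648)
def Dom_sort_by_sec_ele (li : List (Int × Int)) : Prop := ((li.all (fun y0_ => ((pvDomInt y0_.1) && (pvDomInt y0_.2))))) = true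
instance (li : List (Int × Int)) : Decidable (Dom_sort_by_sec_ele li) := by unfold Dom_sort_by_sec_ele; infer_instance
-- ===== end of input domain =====

-- B replaces A's hand-written quadratic bubble sort by the built-in stable sort keyed on the
-- second component (li.sort(key=...)); both mutate the argument in place and return it, the
-- theorems below are about the return value.

-- ===== PORT A =====
-- inner j-loop of A: one left-to-right sweep over the current list, swapping adjacent
-- pairs whose second components are strictly out of order (exactly the j = 0 .. size-2 loop)
def pvBubblePass : List (Int × Int) → List (Int × Int)
  | [] => []
  | [x] => [x]
  | x :: y :: rest => if x.2 > y.2 then y :: pvBubblePass (x :: rest) else x :: pvBubblePass (y :: rest)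

def sort_by_sec_ele (li : List (Int × Int)) : List (Int × Int) :=
  let size : Int := li.length
  (PySem.List.pyRange 1 size 1).foldl (fun acc _ => pvBubblePass acc) li

-- ===== PORT B =====
def sort_by_sec_ele_alt (li : List (Int × Int)) : List (Int × Int) :=
  PySem.List.sorted li (fun t => t.2)

-- ===== PRECONDITION & SPEC =====
def Spec_sort_by_sec_ele (li : List (Int × Int)) (out : List (Int × Int)) : Prop := out = sort_by_sec_ele_alt li
instance (li : List (Int × Int)) (out : List (Int × Int)) : Decidable (Spec_sort_by_sec_ele li out) := by unfold Spec_sort_by_sec_ele; infer_instance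

-- ===== CLAIM (what is proved, stated in full; the proofs are below) =====
def Claim_equal_sort_by_sec_ele : Prop := ∀ (li : List (Int × Int)), Dom_sort_by_sec_ele li → Spec_sort_by_sec_ele li (sort_by_sec_ele li)

-- ===== LEMMAS AND PROOFS =====

theorem pv_mem_bubblePass (l : List (Int × Int)) (a : Int × Int) (h : a ∈ pvBubblePass l) : a ∈ l := by
  induction l using pvBubblePass.induct with
  | case1 => simp [pvBubblePass] at h
  | case2 x => simpa [pvBubblePass] using h
  | case3 x y rest hgt ih =>
      simp only [pvBubblePass, if_pos hgt, List.mem_cons] at h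
      rcases h with h | h
      · simp [h]
      · have := ih h; simp only [List.mem_cons] at this ⊢; tauto
  | case4 x y rest hgt ih =>
      simp only [pvBubblePass, if_neg hgt, List.mem_cons] at h
      rcases h with h | h
      · simp [h]
      · have := ih h; simp only [List.mem_cons] at this ⊢; tauto

theorem pv_mem_iter (m : ℕ) (l : List (Int × Int)) (a : Int × Int)
    (h : a ∈ pvBubblePass^[m] l) : a ∈ l := by
  induction m generalizing l with
  | zero => simpa using h
  | succ m ih =>
      rw [Function.iterate_succ_apply] at h
      exact pv_mem_bubblePass l a (ih _ h)

theorem pv_length_bubblePass (l : List (Int × Int)) : (pvBubblePass l).length = l.length := by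
  induction l using pvBubblePass.induct with
  | case1 => simp [pvBubblePass]
  | case2 x => simp [pvBubblePass]
  | case3 x y rest hgt ih => simp [pvBubblePass, if_pos hgt, ih]
  | case4 x y rest hgt ih => simp [pvBubblePass, if_neg hgt, ih]

theorem pv_bubblePass_append (l : List (Int × Int)) (M : Int × Int)
    (h : ∀ a ∈ l, a.2 ≤ M.2) : pvBubblePass (l ++ [M]) = pvBubblePass l ++ [M] := by
  induction l using pvBubblePass.induct with
  | case1 => simp [pvBubblePass]
  | case2 x =>
      have hx : ¬ x.2 > M.2 := not_lt.2 (h x (by simp))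
      simp [pvBubblePass, if_neg hx]
  | case3 x y rest hgt ih =>
      have h' : ∀ a ∈ x :: rest, a.2 ≤ M.2 := by
        intro a ha; apply h; simp only [List.mem_cons] at ha ⊢; tauto
      simp only [List.cons_append, pvBubblePass, if_pos hgt]
      rw [show x :: (rest ++ [M]) = (x :: rest) ++ [M] from rfl, ih h']
  | case4 x y rest hgt ih =>
      have h' : ∀ a ∈ y :: rest, a.2 ≤ M.2 := by
        intro a ha; apply h; simp only [List.mem_cons] at ha ⊢; tauto
      simp only [List.cons_append, pvBubblePass, if_neg hgt]
      rw [show y :: (rest ++ [M]) = (y :: rest) ++ [M] from rfl, ih h']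

theorem pv_decomp (l : List (Int × Int)) (x : Int × Int) :
    ∃ l' M, pvBubblePass (x :: l) = l' ++ [M] ∧ ∀ a ∈ x :: l, a.2 ≤ M.2 := by
  induction l generalizing x with
  | nil => exact ⟨[], x, by simp [pvBubblePass], by simp⟩
  | cons y rest ih =>
      by_cases hgt : x.2 > y.2
      · obtain ⟨l', M, heq, hmax⟩ := ih x
        refine ⟨y :: l', M, ?_, ?_⟩
        · simp [pvBubblePass, if_pos hgt, heq]
        · intro a ha
          simp only [List.mem_cons] at ha
          rcases ha with rfl | rfl | ha
          · exact hmax a (by simp)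
          · exact le_trans (le_of_lt hgt) (hmax x (by simp))
          · exact hmax a (by simp [ha])
      · obtain ⟨l', M, heq, hmax⟩ := ih y
        refine ⟨x :: l', M, ?_, ?_⟩
        · simp [pvBubblePass, if_neg hgt, heq]
        · intro a ha
          simp only [List.mem_cons] at ha
          rcases ha with rfl | rfl | ha
          · exact le_trans (not_lt.1 hgt) (hmax y (by simp))
          · exact hmax a (by simp)
          · exact hmax a (by simp [ha])

theorem pv_iter_append (m : ℕ) (l : List (Int × Int)) (M : Int × Int)
    (h : ∀ a ∈ l, a.2 ≤ M.2) : pvBubblePass^[m] (l ++ [M]) = pvBubblePass^[m] l ++ [M] := by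
  induction m generalizing l with
  | zero => simp
  | succ m ih =>
      rw [Function.iterate_succ_apply, Function.iterate_succ_apply,
        pv_bubblePass_append l M h]
      exact ih (pvBubblePass l) (fun a ha => h a (pv_mem_bubblePass l a ha))

theorem pv_iter_nil (m : ℕ) : pvBubblePass^[m] ([] : List (Int × Int)) = [] := by
  induction m with
  | zero => rfl
  | succ m ih => rw [Function.iterate_succ_apply, show pvBubblePass [] = [] from by simp [pvBubblePass]]; exact ih

theorem pv_sorted_after (m : ℕ) (l : List (Int × Int)) (hlen : l.length ≤ m + 1) :
    (pvBubblePass^[m] l).Pairwise (fun a b => a.2 ≤ b.2) := by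
  induction m generalizing l with
  | zero =>
      match l, hlen with
      | [], _ => simp
      | [x], _ => simp
  | succ m ih =>
      match l with
      | [] => rw [pv_iter_nil]; simp
      | x :: t =>
          obtain ⟨l', M, heq, hmax⟩ := pv_decomp t x
          have hlen' : l'.length = t.length := by
            have := pv_length_bubblePass (x :: t)
            rw [heq] at this; simp at this; omega
          have hmem : ∀ a ∈ l', a.2 ≤ M.2 := by
            intro a ha
            exact hmax a (pv_mem_bubblePass (x :: t) a (by rw [heq]; simp [ha]))
          rw [Function.iterate_succ_apply, heq, pv_iter_append m l' M hmem]
          rw [List.pairwise_append]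
          refine ⟨ih l' (by simp at hlen; omega), by simp, ?_⟩
          intro a ha b hb
          simp only [List.mem_singleton] at hb; subst hb
          exact hmem a (pv_mem_iter m l' a ha)

-- one insertion step of the insertBy characterisation of PySem.List.sorted
def pvIns (acc : List (Int × Int)) (x : Int × Int) : List (Int × Int) :=
  PySem.List.insertBy (fun a b => decide (a.2 < b.2)) x acc

theorem pvIns_nil (x : Int × Int) : pvIns [] x = [x] := by
  simp [pvIns, PySem.List.insertBy]

theorem pvIns_cons (x a : Int × Int) (acc : List (Int × Int)) :
    pvIns (a :: acc) x = if x.2 < a.2 then x :: a :: acc else a :: pvIns acc x := by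
  by_cases h : x.2 < a.2 <;> simp [pvIns, PySem.List.insertBy, h]

theorem pv_ins_comm (x y : Int × Int) (acc : List (Int × Int)) (h : y.2 < x.2) :
    pvIns (pvIns acc x) y = pvIns (pvIns acc y) x := by
  induction acc with
  | nil =>
      rw [pvIns_nil, pvIns_nil, pvIns_cons, pvIns_cons, if_pos h, if_neg (not_lt.2 (le_of_lt h)), pvIns_nil]
  | cons a acc' ih =>
      by_cases hx : x.2 < a.2
      · have hy : y.2 < a.2 := lt_trans h hx
        rw [pvIns_cons, if_pos hx, pvIns_cons, if_pos h, pvIns_cons, if_pos hy, pvIns_cons,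
          if_neg (not_lt.2 (le_of_lt h)), pvIns_cons, if_pos hx]
      · by_cases hy : y.2 < a.2
        · rw [pvIns_cons, if_neg hx, pvIns_cons, if_pos hy, pvIns_cons, if_pos hy, pvIns_cons,
            if_neg (not_lt.2 (le_of_lt h)), pvIns_cons, if_neg hx]
        · rw [pvIns_cons, if_neg hx, pvIns_cons, if_neg hy, pvIns_cons, if_neg hy,
            pvIns_cons, if_neg hx, ih]

theorem pv_foldl_ins_bubblePass (l : List (Int × Int)) (acc : List (Int × Int)) :
    (pvBubblePass l).foldl pvIns acc = l.foldl pvIns acc := by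
  induction l using pvBubblePass.induct generalizing acc with
  | case1 => simp [pvBubblePass]
  | case2 x => simp [pvBubblePass]
  | case3 x y rest hgt ih =>
      simp only [pvBubblePass, if_pos hgt, List.foldl_cons]
      rw [ih (pvIns acc y)]
      simp only [List.foldl_cons]
      rw [pv_ins_comm x y acc hgt]
  | case4 x y rest hgt ih =>
      simp only [pvBubblePass, if_neg hgt, List.foldl_cons]
      rw [ih (pvIns acc x)]
      simp [List.foldl_cons]

theorem pv_foldl_ins_iter (m : ℕ) (l : List (Int × Int)) :
    (pvBubblePass^[m] l).foldl pvIns [] = l.foldl pvIns [] := by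
  induction m generalizing l with
  | zero => simp
  | succ m ih =>
      rw [Function.iterate_succ_apply, ih (pvBubblePass l), pv_foldl_ins_bubblePass]

theorem pv_foldl_ins_sorted (l : List (Int × Int)) (acc : List (Int × Int))
    (h : (acc ++ l).Pairwise (fun a b => a.2 ≤ b.2)) : l.foldl pvIns acc = acc ++ l := by
  induction l generalizing acc with
  | nil => simp
  | cons x t ih =>
      have hins : pvIns acc x = acc ++ [x] := by
        apply PySem.List.insertBy_of_forall_not_before
        intro a ha
        have : a.2 ≤ x.2 := by
          rw [List.pairwise_append] at h
          exact h.2.2 a ha x (by simp)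
        simp [not_lt.2 this]
      rw [List.foldl_cons]
      show List.foldl pvIns (pvIns acc x) t = acc ++ x :: t
      rw [hins, ih (acc ++ [x]) (by simpa using h)]
      simp

theorem pv_foldl_const {α β : Type} (f : α → α) (r : List β) (acc : α) :
    r.foldl (fun a _ => f a) acc = f^[r.length] acc := by
  induction r generalizing acc with
  | nil => rfl
  | cons b r ih => simp [List.foldl_cons, ih, Function.iterate_succ_apply]

-- ===== VERDICT (by name: the statement is the Claim_ definition above) =====
theorem sort_by_sec_ele_spec : Claim_equal_sort_by_sec_ele := by
  intro li _
  unfold Spec_sort_by_sec_ele sort_by_sec_ele sort_by_sec_ele_alt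
  rw [pv_foldl_const pvBubblePass _ li, PySem.List.length_pyRange_one]
  have hlen : li.length ≤ ((li.length : Int) - 1).toNat + 1 := by omega
  have hpw := pv_sorted_after _ li hlen
  rw [PySem.List.sorted_eq_foldl_insertBy li (fun t => t.2)]
  have h1 : li.foldl (fun acc x => PySem.List.insertBy (fun a b => decide (a.2 < b.2)) x acc) [] = li.foldl pvIns [] := rfl
  rw [h1, ← pv_foldl_ins_iter (((li.length : Int) - 1).toNat) li]
  exact (pv_foldl_ins_sorted _ [] (by simpa using hpw)).symm
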